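-- pv_equiv track=rewrite | github.com/caoyu-noob/CASe | transform_dataset.py | find_invalid_indices
-- ===== SOURCE A (Python) =====
-- def find_invalid_indices(context):
--     start = -1
--     flag = False
--     remove_indices = []
--     for i, c in enumerate(context):
--         if c == '\n':
--             if flag == False:
--                 start = i
--                 flag = True
--         else:
--             if flag == True:
--                 remove_indices.append((start, i))
--                 flag = False
--     return remove_indices
-- ===== SOURCE B (Python) =====
-- def find_invalid_indices(context):
--     res = []
--     n = len(context)
--     i = 0
--     while i < n:
--         if context[i] == '\n':
--             j = i
--             while j < n and context[j] == '\n':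
--                 j += 1
--             if j < n:
--                 res.append((i, j))
--             i = j
--         else:
--             i += 1
--     return res
-- ===== Notes on version B (the rewrite author's own statement) =====
-- stated objective: alternative
-- what changed: Replaced the flag/start state machine over enumerate with a two-pointer scan: on meeting a newline an inner loop jumps to the end of the maximal newline run and records the run's (start, end) at once, recording nothing for a run that reaches the end of the string.
import Mathlib
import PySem

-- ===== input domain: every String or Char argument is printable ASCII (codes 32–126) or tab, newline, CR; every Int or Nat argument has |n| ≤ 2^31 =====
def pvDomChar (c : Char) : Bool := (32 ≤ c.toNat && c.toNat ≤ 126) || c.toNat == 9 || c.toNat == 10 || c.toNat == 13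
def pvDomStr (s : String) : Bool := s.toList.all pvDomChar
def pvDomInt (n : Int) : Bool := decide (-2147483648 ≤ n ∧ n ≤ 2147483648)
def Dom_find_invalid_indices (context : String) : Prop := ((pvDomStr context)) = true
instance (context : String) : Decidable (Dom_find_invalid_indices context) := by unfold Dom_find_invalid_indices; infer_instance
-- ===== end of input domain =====

-- B replaces A's flag/start state machine by a two-pointer scan that consumes each
-- maximal newline run at once (objective: alternative; same cost, different traversal).

-- ===== PORT A =====
-- state = (start, flag, remove_indices); loop over enumerate(context)
def find_invalid_indices (context : String) : List (Int × Int) :=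
  let r := (PySem.List.enumerate context.toList).foldl
    (fun (st : Int × Bool × List (Int × Int)) (p : Int × Char) =>
      let start := st.1; let flag := st.2.1; let acc := st.2.2
      let i := p.1; let c := p.2
      if c = '\n' then
        if flag = false then (i, true, acc) else (start, flag, acc)
      else
        if flag = true then (start, false, acc ++ [(start, i)]) else (start, flag, acc))
    (-1, false, [])
  r.2.2

-- ===== PORT B =====
-- inner while loop: length of the leading newline run
def pvCountNl : List Char → Nat
  | [] => 0
  | c :: rest => if c = '\n' then pvCountNl rest + 1 else 0

-- outer while loop of Source B, as recursion on the remaining characters (i = current index)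
def pvAltGo : List Char → Int → List (Int × Int)
  | [], _ => []
  | c :: rest, i =>
    if hc : c = '\n' then
      if (c :: rest).drop (pvCountNl (c :: rest)) = [] then []
      else (i, i + (pvCountNl (c :: rest) : Int)) ::
        pvAltGo ((c :: rest).drop (pvCountNl (c :: rest))) (i + (pvCountNl (c :: rest) : Int))
    else
      pvAltGo rest (i + 1)
  termination_by cs _ => cs.length
  decreasing_by
    · simp only [List.length_drop, pvCountNl, if_pos hc, List.length_cons]; omega
    · simp

def find_invalid_indices_alt (context : String) : List (Int × Int) :=
  pvAltGo context.toList 0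

-- ===== PRECONDITION & SPEC =====
def Spec_find_invalid_indices (context : String) (out : List (Int × Int)) : Prop := out = find_invalid_indices_alt context
instance (context : String) (out : List (Int × Int)) : Decidable (Spec_find_invalid_indices context out) := by unfold Spec_find_invalid_indices; infer_instance

-- ===== CLAIM (what is proved, stated in full; the proofs are below) =====
def Claim_equal_find_invalid_indices : Prop := ∀ (context : String), Dom_find_invalid_indices context → Spec_find_invalid_indices context (find_invalid_indices context)

-- ===== LEMMAS AND PROOFS =====

-- one-character-at-a-time reference: flag = some start / none
def pvSpecGo : List Char → Int → Option Int → List (Int × Int)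
  | [], _, _ => []
  | c :: rest, i, none =>
    if c = '\n' then pvSpecGo rest (i + 1) (some i) else pvSpecGo rest (i + 1) none
  | c :: rest, i, some s =>
    if c = '\n' then pvSpecGo rest (i + 1) (some s) else (s, i) :: pvSpecGo rest (i + 1) none

-- A's loop step
def pvStepA (st : Int × Bool × List (Int × Int)) (p : Int × Char) : Int × Bool × List (Int × Int) :=
  let start := st.1; let flag := st.2.1; let acc := st.2.2
  let i := p.1; let c := p.2
  if c = '\n' then
    if flag = false then (i, true, acc) else (start, flag, acc)
  else
    if flag = true then (start, false, acc ++ [(start, i)]) else (start, flag, acc)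

lemma pvFoldA_eq_spec (cs : List Char) : ∀ (i start : Int) (flag : Bool) (acc : List (Int × Int)),
    ((PySem.List.enumerate cs i).foldl pvStepA (start, flag, acc)).2.2
      = acc ++ pvSpecGo cs i (if flag then some start else none) := by
  induction cs with
  | nil => intro i start flag acc; simp [PySem.List.enumerate_nil, pvSpecGo]
  | cons c rest ih =>
    intro i start flag acc
    rw [PySem.List.enumerate_cons]
    by_cases hc : c = '\n'
    · cases flag with
      | false =>
        simp only [List.foldl_cons, pvStepA, hc]
        simpa [pvSpecGo, hc] using ih (i + 1) i true acc
      | true =>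
        simp only [List.foldl_cons, pvStepA, hc]
        simpa [pvSpecGo, hc] using ih (i + 1) start true acc
    · cases flag with
      | false =>
        simp only [List.foldl_cons, pvStepA, if_neg hc]
        simpa [pvSpecGo, hc] using ih (i + 1) start false acc
      | true =>
        simp only [List.foldl_cons, pvStepA, if_neg hc]
        have := ih (i + 1) start false (acc ++ [(start, i)])
        simpa [pvSpecGo, hc] using this
  
lemma pvCountNl_le (cs : List Char) : pvCountNl cs ≤ cs.length := by
  induction cs with
  | nil => simp [pvCountNl]
  | cons c r ih => simp only [pvCountNl, List.length_cons]; split <;> omega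

-- flag-set behaviour of the reference, in run-skipping form
lemma pvSpecGo_some (cs : List Char) : ∀ (j s : Int),
    pvSpecGo cs j (some s) =
      (if cs.drop (pvCountNl cs) = [] then []
       else (s, j + (pvCountNl cs : Int)) ::
         pvSpecGo (cs.drop (pvCountNl cs)) (j + (pvCountNl cs : Int)) none) := by
  induction cs with
  | nil => intro j s; simp [pvSpecGo, pvCountNl]
  | cons c rest ih =>
    intro j s
    by_cases hc : c = '\n'
    · rw [pvSpecGo, if_pos hc, ih (j + 1) s]
      rw [pvCountNl, if_pos hc]
      have hd : (c :: rest).drop (pvCountNl rest + 1) = rest.drop (pvCountNl rest) := by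
        simp
      rw [hd]
      have : j + ((pvCountNl rest : Int) + 1) = j + 1 + (pvCountNl rest : Int) := by ring
      push_cast
      rw [this]
    · rw [pvSpecGo, if_neg hc, pvCountNl, if_neg hc]
      simp [pvSpecGo, hc]

lemma pvAltGo_eq_spec (n : Nat) : ∀ (cs : List Char), cs.length ≤ n →
    ∀ (i : Int), pvAltGo cs i = pvSpecGo cs i none := by
  induction n with
  | zero =>
    intro cs h i
    have : cs = [] := List.eq_nil_of_length_eq_zero (Nat.le_zero.mp h)
    subst this; simp [pvAltGo, pvSpecGo]
  | succ n ih =>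
    intro cs h i
    match cs with
    | [] => simp [pvAltGo, pvSpecGo]
    | c :: rest =>
      by_cases hc : c = '\n'
      · rw [pvAltGo, dif_pos hc, pvSpecGo, if_pos hc, pvSpecGo_some]
        have hm : pvCountNl (c :: rest) = pvCountNl rest + 1 := by rw [pvCountNl, if_pos hc]
        have hd : (c :: rest).drop (pvCountNl (c :: rest)) = rest.drop (pvCountNl rest) := by
          rw [hm]; simp
        rw [hd]
        by_cases he : rest.drop (pvCountNl rest) = []
        · simp [he]
        · rw [if_neg he, if_neg he]
          have hi : i + (pvCountNl (c :: rest) : Int) = i + 1 + (pvCountNl rest : Int) := by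
            rw [hm]; push_cast; ring
          rw [hi]
          congr 1
          have hlen : (rest.drop (pvCountNl rest)).length ≤ n := by
            have := pvCountNl_le rest
            simp only [List.length_drop]
            simp only [List.length_cons] at h
            omega
          rw [ih _ hlen]
      · rw [pvAltGo, dif_neg hc, pvSpecGo, if_neg hc]
        exact ih rest (by simp at h; omega) (i + 1)

-- ===== VERDICT (by name: the statement is the Claim_ definition above) =====
theorem find_invalid_indices_spec : Claim_equal_find_invalid_indices := by
  intro context _
  unfold Spec_find_invalid_indices find_invalid_indices find_invalid_indices_alt
  have hA := pvFoldA_eq_spec context.toList 0 (-1) false []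
  have hB := pvAltGo_eq_spec context.toList.length context.toList (le_refl _) 0
  simpa [pvStepA, hB] using hA
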